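-- pv_equiv track=rewrite | github.com/hswek/algorithm | 프로그래머스/3/77886. 110 옮기기/110 옮기기.py | solution
-- ===== SOURCE A (Python) =====
-- def solution(s):
--     answer = []
--     for string in s:
--         now=''
--         idx=0
--         c=0
--         while idx<len(string):
--             if now[-2:]=='11' and string[idx]=='0':
--                 c+=1
--                 now=now[:-2]
--             else:
--                 now+=string[idx]
--             idx+=1
--         idx=now.find('111')
--         if idx!=-1:
--             answer.append(now[:idx]+'110'*c + now[idx:])
--         else:
--             idx=now.rfind('0')
--             answer.append(now[:idx+1]+'110'*c + now[idx+1:])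
--     return answer
-- ===== SOURCE B (Python) =====
-- def solution(s):
--     out = []
--     for t in s:
--         c = 0
--         while True:
--             u = t.replace('110', '')
--             if u == t:
--                 break
--             c += (len(t) - len(u)) // 3
--             t = u
--         p = t.find('111')
--         if p == -1:
--             p = t.rfind('0') + 1
--         out.append(t[:p] + '110' * c + t[p:])
--     return out
-- ===== Notes on version B (the rewrite author's own statement) =====
-- stated objective: alternative
-- what changed: B has no character stack at all: it reduces each string by repeatedly applying str.replace('110','') until a fixpoint, counting removals from the length difference, then inserts '110'*c at a single computed position instead of A's per-character stack pass and two-branch append.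
import Mathlib
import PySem

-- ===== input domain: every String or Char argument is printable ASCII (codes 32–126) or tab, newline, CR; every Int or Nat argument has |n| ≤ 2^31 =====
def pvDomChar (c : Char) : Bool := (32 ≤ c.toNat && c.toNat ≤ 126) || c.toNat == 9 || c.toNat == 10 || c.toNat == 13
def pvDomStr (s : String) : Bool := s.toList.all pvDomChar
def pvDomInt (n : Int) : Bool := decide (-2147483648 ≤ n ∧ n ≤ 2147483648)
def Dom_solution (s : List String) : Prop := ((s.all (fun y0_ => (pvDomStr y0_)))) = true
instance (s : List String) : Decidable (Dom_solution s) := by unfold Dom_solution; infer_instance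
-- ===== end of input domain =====

-- B replaces A's per-character stack reduction by repeated global str.replace('110','')
-- passes until a fixpoint, counting removals from the length difference, and merges A's
-- two-branch reinsertion into one computed position (objective: alternative; same
-- return value on every input).

-- ===== PORT A =====
-- the while-loop body: now[-2:] == '11' and string[idx] == '0' → c += 1, now = now[:-2]; else now += string[idx]
def solAStep (st : List Char × Nat) (ch : Char) : List Char × Nat :=
  if PySem.List.slice st.1 (some (-2)) none = ['1', '1'] ∧ ch = '0' then
    (PySem.List.slice st.1 none (some (-2)), st.2 + 1)
  else (st.1 ++ [ch], st.2)

-- one iteration of A's outer for-loop (the string 'now' is carried as its list of code points)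
def solAOne (string : String) : String :=
  let st := string.toList.foldl solAStep ([], 0)
  let now := st.1
  let c := st.2
  let idx := PySem.Chars.find now ['1', '1', '1']
  if idx ≠ -1 then
    String.mk (PySem.List.slice now none (some idx) ++
      (List.replicate c ['1', '1', '0']).flatten ++ PySem.List.slice now (some idx) none)
  else
    let idx2 := PySem.Chars.rfind now ['0']
    String.mk (PySem.List.slice now none (some (idx2 + 1)) ++
      (List.replicate c ['1', '1', '0']).flatten ++ PySem.List.slice now (some (idx2 + 1)) none)

def solution (s : List String) : List String :=
  s.foldl (fun answer string => answer ++ [solAOne string]) []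

-- ===== PORT B =====
-- Termination helpers for B's while-loop (the port cites replace110_lt in decreasing_by):
-- pass110 is a proof-side characterisation of one t.replace('110','') pass.
def pass110 : List Char → List Char
  | [] => []
  | c :: t => if ['1', '1', '0'].isPrefixOf (c :: t) then pass110 (t.drop 2) else c :: pass110 t
termination_by l => l.length
decreasing_by all_goals (simp; try omega)

theorem pass110_go (fuel : Nat) : ∀ (l acc : List Char), l.length ≤ fuel →
    PySem.Chars.replace.go ['1', '1', '0'] [] fuel l acc = acc.reverse ++ pass110 l := by
  induction fuel with
  | zero =>
    intro l acc h
    have : l = [] := by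
      cases l with
      | nil => rfl
      | cons a t => simp at h
    subst this
    rw [PySem.Chars.replace.go.eq_def]
    simp [pass110]
  | succ n ih =>
    intro l acc h
    rw [PySem.Chars.replace.go.eq_def]
    cases l with
    | nil => simp [pass110]
    | cons c t =>
      dsimp only
      by_cases hp : ['1', '1', '0'].isPrefixOf (c :: t)
      · have h3 : List.drop (['1', '1', '0'] : List Char).length (c :: t) = t.drop 2 := rfl
        rw [if_pos hp, h3, show ([] : List Char).reverse ++ acc = acc from by simp,
          ih (t.drop 2) acc (by simp at h ⊢; omega)]
        have h4 : pass110 (c :: t) = pass110 (t.drop 2) := by rw [pass110, if_pos hp]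
        rw [h4]
      · rw [if_neg hp, ih t (c :: acc) (by simp at h ⊢; omega)]
        rw [pass110, if_neg hp]
        simp

theorem replace110_eq (t : List Char) :
    PySem.Chars.replace t ['1', '1', '0'] [] = pass110 t := by
  rw [PySem.Chars.replace]
  simp only [List.isEmpty_cons, Bool.false_eq_true, if_false]
  rw [pass110_go t.length t [] le_rfl]
  simp

theorem pass110_len_le (t : List Char) : (pass110 t).length ≤ t.length := by
  induction t using pass110.induct with
  | case1 => simp [pass110]
  | case2 c t hp ih =>
    rw [pass110, if_pos hp]
    have h1 := ih
    have h2 := List.length_drop (l := t) (i := 2)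
    simp at h1 ⊢
    omega
  | case3 c t hp ih =>
    rw [pass110, if_neg hp]
    simpa using Nat.succ_le_succ ih

theorem pass110_ne_lt (t : List Char) (h : pass110 t ≠ t) :
    (pass110 t).length < t.length := by
  induction t using pass110.induct with
  | case1 => simp [pass110] at h
  | case2 c t hp ih =>
    rw [pass110, if_pos hp]
    have h1 := pass110_len_le (t.drop 2)
    have h2 := List.length_drop (l := t) (i := 2)
    have h3 : 3 ≤ (c :: t).length := (List.isPrefixOf_iff_prefix.mp hp).length_le
    simp at h3
    simp
    omega
  | case3 c t hp ih =>
    rw [pass110, if_neg hp] at h ⊢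
    have : pass110 t ≠ t := fun he => h (by rw [he])
    simpa using Nat.succ_lt_succ (ih this)

theorem replace110_lt (t : List Char) (h : PySem.Chars.replace t ['1', '1', '0'] [] ≠ t) :
    (PySem.Chars.replace t ['1', '1', '0'] []).length < t.length := by
  rw [replace110_eq] at h ⊢
  exact pass110_ne_lt t h

-- B's while-loop: u = t.replace('110',''); stop at the fixpoint, else c += (len(t)-len(u))//3
-- ('//' ported as Nat division: u is never longer than t, so the difference is a Nat)
def solBReduce (t : List Char) (c : Nat) : List Char × Nat :=
  let u := PySem.Chars.replace t ['1', '1', '0'] []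
  if h : u = t then (t, c)
  else solBReduce u (c + (t.length - u.length) / 3)
termination_by t.length
decreasing_by exact replace110_lt t h

-- one iteration of B's outer for-loop
def solBOne (t0 : String) : String :=
  let st := solBReduce t0.toList 0
  let t := st.1
  let c := st.2
  let p0 : Int := PySem.Chars.find t ['1', '1', '1']
  let p : Int := if p0 = -1 then PySem.Chars.rfind t ['0'] + 1 else p0
  String.mk (PySem.List.slice t none (some p) ++
    (List.replicate c ['1', '1', '0']).flatten ++ PySem.List.slice t (some p) none)

def solution_alt (s : List String) : List String := s.map solBOne

-- ===== PRECONDITION & SPEC =====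
def Spec_solution (s : List String) (out : List String) : Prop := out = solution_alt s
instance (s : List String) (out : List String) : Decidable (Spec_solution s out) := by unfold Spec_solution; infer_instance

-- ===== CLAIM (what is proved, stated in full; the proofs are below) =====
def Claim_equal_solution : Prop := ∀ (s : List String), Dom_solution s → Spec_solution s (solution s)

-- ===== LEMMAS AND PROOFS =====

-- 3 divides the number of characters a pass removes
theorem pass110_dvd (t : List Char) : 3 ∣ (t.length - (pass110 t).length) := by
  induction t using pass110.induct with
  | case1 => simp [pass110]
  | case2 c t hp ih =>
    rw [pass110, if_pos hp]
    have h1 := pass110_len_le (t.drop 2)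
    have h2 := List.length_drop (l := t) (i := 2)
    have h3 : 3 ≤ (c :: t).length := (List.isPrefixOf_iff_prefix.mp hp).length_le
    simp at h3
    simp
    omega
  | case3 c t hp ih =>
    rw [pass110, if_neg hp]
    have := pass110_len_le t
    simp
    omega

-- the three slice facts about A's step on a stack ending in '1','1'
theorem slice_from_two (ys : List Char) (a b : Char) :
    PySem.List.slice (ys ++ [a, b]) (some (-2)) none = [a, b] := by
  rw [PySem.List.slice_from_neg_ofNat _ 2 (by omega)]
  simp

theorem slice_to_two (ys : List Char) (a b : Char) :
    PySem.List.slice (ys ++ [a, b]) none (some (-2)) = ys := by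
  rw [PySem.List.slice_to_neg_ofNat _ 2 (by omega)]
  simp

-- a stack whose now[-2:] is '11' ends in '1','1'
theorem ends_eleven (s : List Char) (h : PySem.List.slice s (some (-2)) none = ['1', '1']) :
    ∃ s', s = s' ++ ['1', '1'] := by
  rw [PySem.List.slice_from_neg_ofNat _ 2 (by omega)] at h
  exact ⟨s.take (s.length - 2), by rw [← h]; simp⟩

-- A's fold agrees after one replace pass, with the count shifted by the removals of that pass
theorem foldP (t : List Char) : ∀ (s : List Char) (c : Nat),
    t.foldl solAStep (s, c) =
      (pass110 t).foldl solAStep (s, c + (t.length - (pass110 t).length) / 3) := by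
  induction t using pass110.induct with
  | case1 => intro s c; simp [pass110]
  | case2 ch t hp ih =>
    intro s c
    obtain ⟨r, hu⟩ := List.isPrefixOf_iff_prefix.mp hp
    simp only [List.cons_append, List.nil_append] at hu
    injection hu with h1 h2
    subst h1; subst h2
    have hpass : pass110 ('1' :: '1' :: '0' :: r) = pass110 r := by
      rw [pass110, if_pos hp]
      simp only [show List.drop 2 ('1' :: '0' :: r) = r from rfl]
    rw [hpass]
    have step1 : solAStep (s, c) '1' = (s ++ ['1'], c) := by
      simp [solAStep]
    have step2 : solAStep (s ++ ['1'], c) '1' = (s ++ ['1', '1'], c) := by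
      simp [solAStep]
    have step3 : solAStep (s ++ ['1', '1'], c) '0' = (s, c + 1) := by
      simp only [solAStep, slice_from_two, slice_to_two, and_true]
      simp
    rw [List.foldl_cons, step1, List.foldl_cons, step2, List.foldl_cons, step3]
    have ih' := ih s (c + 1)
    simp only [show List.drop 2 ('1' :: '0' :: r) = r from rfl] at ih'
    rw [ih']
    have h1 := pass110_len_le r
    have h2 := pass110_dvd r
    congr 1
    congr 1
    simp only [List.length_cons]
    omega
  | case3 ch t hp ih =>
    intro s c
    rw [pass110, if_neg hp]
    have hk : ((ch :: t).length - (ch :: pass110 t).length) / 3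
        = (t.length - (pass110 t).length) / 3 := by simp
    rw [List.foldl_cons, List.foldl_cons, hk]
    by_cases hcond : PySem.List.slice s (some (-2)) none = ['1', '1'] ∧ ch = '0'
    · simp only [solAStep, if_pos hcond]
      rw [ih]
      congr 1
      congr 1
      omega
    · simp only [solAStep, if_neg hcond]
      rw [ih]

-- on a string with no '110' anywhere across the stack boundary, A's fold just appends
theorem foldFix (t : List Char) : ∀ (s : List Char) (c : Nat),
    ¬ (['1', '1', '0'] <:+: (s ++ t)) → t.foldl solAStep (s, c) = (s ++ t, c) := by
  induction t with
  | nil => intro s c _; simp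
  | cons ch t ih =>
    intro s c hni
    have hcond : ¬ (PySem.List.slice s (some (-2)) none = ['1', '1'] ∧ ch = '0') := by
      rintro ⟨hsl, rfl⟩
      obtain ⟨s', rfl⟩ := ends_eleven s hsl
      exact hni ⟨s', t, by simp⟩
    rw [List.foldl_cons]
    simp only [solAStep, if_neg hcond]
    rw [ih (s ++ [ch]) c (by simpa using hni)]
    simp

-- a '110' infix makes a pass strictly shrink, so a fixpoint has no '110'
theorem infix_pass110_lt (t : List Char) (h : ['1', '1', '0'] <:+: t) :
    (pass110 t).length < t.length := by
  induction t using pass110.induct with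
  | case1 => simp at h
  | case2 c t hp ih =>
    rw [pass110, if_pos hp]
    have h1 := pass110_len_le (t.drop 2)
    have h2 := List.length_drop (l := t) (i := 2)
    have h3 : 3 ≤ (c :: t).length := (List.isPrefixOf_iff_prefix.mp hp).length_le
    simp at h3
    simp
    omega
  | case3 c t hp ih =>
    rw [pass110, if_neg hp]
    obtain ⟨u, v, huv⟩ := h
    have hinf : ['1', '1', '0'] <:+: t := by
      cases u with
      | nil => exact absurd (List.isPrefixOf_iff_prefix.mpr ⟨v, by simpa using huv⟩) hp
      | cons x u' =>
        refine ⟨u', v, ?_⟩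
        have h2 := congrArg List.tail huv
        simpa using h2
    simpa using Nat.succ_lt_succ (ih hinf)

theorem fix_no_infix (t : List Char) (h : pass110 t = t) :
    ¬ (['1', '1', '0'] <:+: t) := fun hi => by
  have := infix_pass110_lt t hi
  rw [h] at this
  omega

-- A's fold computes exactly B's reduction loop
theorem foldRed (t : List Char) (c : Nat) :
    t.foldl solAStep ([], c) = solBReduce t c := by
  induction t, c using solBReduce.induct with
  | case1 t c u h =>
    rw [solBReduce]
    rw [dif_pos h]
    have h' : pass110 t = t := by rw [← replace110_eq]; exact h
    exact foldFix t [] c (by simpa using fix_no_infix t h')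
  | case2 t c u h ih =>
    rw [solBReduce]
    rw [dif_neg h]
    have h1 : u = pass110 t := by rw [← replace110_eq]
    rw [foldP t [] c, ← h1]
    exact ih

-- per-string agreement
theorem one_eq (t0 : String) : solAOne t0 = solBOne t0 := by
  unfold solAOne solBOne
  rw [foldRed t0.toList 0]
  set st := solBReduce t0.toList 0 with hst
  simp only
  by_cases h : PySem.Chars.find st.1 ['1', '1', '1'] = -1
  · simp [h]
  · simp [h]

-- A's foldl-append outer loop is a map
theorem foldl_append_map (s : List String) : ∀ (acc : List String),
    s.foldl (fun answer string => answer ++ [solAOne string]) acc = acc ++ s.map solAOne := by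
  induction s with
  | nil => intro acc; simp
  | cons x t ih => intro acc; rw [List.foldl_cons, ih]; simp

-- ===== VERDICT (by name: the statement is the Claim_ definition above) =====
theorem solution_spec : Claim_equal_solution := by
  intro s _
  unfold Spec_solution solution solution_alt
  rw [foldl_append_map s []]
  simp [funext one_eq]
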